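-- pv_equiv track=rewrite | github.com/sidd1801/BT-group-BOOTCAMP | challenges/challenge-023-series-1-5-9-13/solution.py | generate_series
-- ===== SOURCE A (Python) =====
-- def generate_series(n):
--     result = []
--     current = 1
--
--     increments = [4, 4, 4, 8]
--     cycle_count = 0  # how many full cycles completed
--     idx = 0
--
--     while current <= n:
--         result.append(current)
--
--         # After completing 2 full cycles, allow only 1 more increment then stop
--         if cycle_count >= 2 and idx == 1:
--             break
--
--         next_val = current + increments[idx]
--         if next_val > n:
--             break
--
--         current = next_val
--         idx += 1
--
--         # cycle completed
--         if idx == 4: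
--             idx = 0
--             cycle_count += 1
--
--     return result
-- ===== SOURCE B (Python) =====
-- # B: the series is always a prefix of a fixed table; one filter pass.
-- _SERIES = [1, 5, 9, 13, 21, 25, 29, 33, 41, 45]
--
-- def generate_series(n):
--     return [x for x in _SERIES if x <= n]
-- ===== Notes on version B (the rewrite author's own statement) =====
-- stated objective: simpler
-- what changed: Replaces the incremental while-loop with cycle/index bookkeeping by a precomputed table of all values the loop can ever emit, filtered by x <= n (the loop always returns a prefix of that fixed table).
import Mathlib
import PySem

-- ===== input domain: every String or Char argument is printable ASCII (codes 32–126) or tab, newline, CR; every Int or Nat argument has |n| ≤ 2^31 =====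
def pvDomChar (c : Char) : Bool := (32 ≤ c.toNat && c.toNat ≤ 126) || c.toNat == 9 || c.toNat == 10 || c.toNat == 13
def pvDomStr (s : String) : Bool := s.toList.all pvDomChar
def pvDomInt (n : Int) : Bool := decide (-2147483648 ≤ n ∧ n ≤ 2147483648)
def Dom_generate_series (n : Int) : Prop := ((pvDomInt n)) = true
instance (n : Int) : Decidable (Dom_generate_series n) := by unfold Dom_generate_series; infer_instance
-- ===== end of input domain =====

-- B replaces A's incremental while-loop by filtering a precomputed fixed table of all values the loop can emit (simpler; same result).

-- ===== PORT A =====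
-- loop of A: structural recursion on a fuel guard (12 > max iteration count; the
-- loop breaks after at most 10 appends), same state and branch order as the Python.
def loopA (fuel : Nat) (result : List Int) (current : Int)
    (cycle_count : Int) (idx : Nat) (n : Int) : List Int :=
  match fuel with
  | 0 => result
  | fuel + 1 =>
    if current ≤ n then
      let result := result ++ [current]
      if cycle_count ≥ 2 ∧ idx = 1 then result
      else
        let next_val := current + ([4, 4, 4, 8] : List Int).getD idx 0
        if next_val > n then result
        else
          let idx' := idx + 1
          if idx' = 4 then loopA fuel result next_val (cycle_count + 1) 0 n
          else loopA fuel result next_val cycle_count idx' n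
    else result

def generate_series (n : Int) : List Int := loopA 12 [] 1 0 0 n

-- ===== PORT B =====
def seriesTable : List Int := [1, 5, 9, 13, 21, 25, 29, 33, 41, 45]

def generate_series_alt (n : Int) : List Int := seriesTable.filter (fun x => x ≤ n)

-- ===== PRECONDITION & SPEC =====
def Spec_generate_series (n : Int) (out : List Int) : Prop := out = generate_series_alt n
instance (n : Int) (out : List Int) : Decidable (Spec_generate_series n out) := by unfold Spec_generate_series; infer_instance

-- ===== CLAIM (what is proved, stated in full; the proofs are below) =====
def Claim_equal_generate_series : Prop := ∀ (n : Int), Dom_generate_series n → Spec_generate_series n (generate_series n)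

-- ===== LEMMAS AND PROOFS =====

-- ===== VERDICT (by name: the statement is the Claim_ definition above) =====
theorem generate_series_key (n : Int) : generate_series n = generate_series_alt n := by
  unfold generate_series generate_series_alt seriesTable
  by_cases h0 : n < 1
  · simp [loopA, List.filter, show ¬((1:Int) ≤ n) from by omega, show ¬((5:Int) ≤ n) from by omega, show ¬((9:Int) ≤ n) from by omega, show ¬((13:Int) ≤ n) from by omega, show ¬((21:Int) ≤ n) from by omega, show ¬((25:Int) ≤ n) from by omega, show ¬((29:Int) ≤ n) from by omega, show ¬((33:Int) ≤ n) from by omega, show ¬((41:Int) ≤ n) from by omega, show ¬((45:Int) ≤ n) from by omega]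
  by_cases h1 : 1 ≤ n ∧ n < 5
  · simp [loopA, List.filter, show (1:Int) ≤ n from by omega, show ¬((5:Int) ≤ n) from by omega, show n < (5:Int) from by omega, show ¬((9:Int) ≤ n) from by omega, show ¬((13:Int) ≤ n) from by omega, show ¬((21:Int) ≤ n) from by omega, show ¬((25:Int) ≤ n) from by omega, show ¬((29:Int) ≤ n) from by omega, show ¬((33:Int) ≤ n) from by omega, show ¬((41:Int) ≤ n) from by omega, show ¬((45:Int) ≤ n) from by omega]
  by_cases h2 : 5 ≤ n ∧ n < 9
  · simp [loopA, List.filter, show (1:Int) ≤ n from by omega, show (5:Int) ≤ n from by omega, show ¬(n < (5:Int)) from by omega, show ¬((9:Int) ≤ n) from by omega, show n < (9:Int) from by omega, show ¬((13:Int) ≤ n) from by omega, show ¬((21:Int) ≤ n) from by omega, show ¬((25:Int) ≤ n) from by omega, show ¬((29:Int) ≤ n) from by omega, show ¬((33:Int) ≤ n) from by omega, show ¬((41:Int) ≤ n) from by omega, show ¬((45:Int) ≤ n) from by omega]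
  by_cases h3 : 9 ≤ n ∧ n < 13
  · simp [loopA, List.filter, show (1:Int) ≤ n from by omega, show (5:Int) ≤ n from by omega, show ¬(n < (5:Int)) from by omega, show (9:Int) ≤ n from by omega, show ¬(n < (9:Int)) from by omega, show ¬((13:Int) ≤ n) from by omega, show n < (13:Int) from by omega, show ¬((21:Int) ≤ n) from by omega, show ¬((25:Int) ≤ n) from by omega, show ¬((29:Int) ≤ n) from by omega, show ¬((33:Int) ≤ n) from by omega, show ¬((41:Int) ≤ n) from by omega, show ¬((45:Int) ≤ n) from by omega]
  by_cases h4 : 13 ≤ n ∧ n < 21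
  · simp [loopA, List.filter, show (1:Int) ≤ n from by omega, show (5:Int) ≤ n from by omega, show ¬(n < (5:Int)) from by omega, show (9:Int) ≤ n from by omega, show ¬(n < (9:Int)) from by omega, show (13:Int) ≤ n from by omega, show ¬(n < (13:Int)) from by omega, show ¬((21:Int) ≤ n) from by omega, show n < (21:Int) from by omega, show ¬((25:Int) ≤ n) from by omega, show ¬((29:Int) ≤ n) from by omega, show ¬((33:Int) ≤ n) from by omega, show ¬((41:Int) ≤ n) from by omega, show ¬((45:Int) ≤ n) from by omega]
  by_cases h5 : 21 ≤ n ∧ n < 25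
  · simp [loopA, List.filter, show (1:Int) ≤ n from by omega, show (5:Int) ≤ n from by omega, show ¬(n < (5:Int)) from by omega, show (9:Int) ≤ n from by omega, show ¬(n < (9:Int)) from by omega, show (13:Int) ≤ n from by omega, show ¬(n < (13:Int)) from by omega, show (21:Int) ≤ n from by omega, show ¬(n < (21:Int)) from by omega, show ¬((25:Int) ≤ n) from by omega, show n < (25:Int) from by omega, show ¬((29:Int) ≤ n) from by omega, show ¬((33:Int) ≤ n) from by omega, show ¬((41:Int) ≤ n) from by omega, show ¬((45:Int) ≤ n) from by omega]
  by_cases h6 : 25 ≤ n ∧ n < 29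
  · simp [loopA, List.filter, show (1:Int) ≤ n from by omega, show (5:Int) ≤ n from by omega, show ¬(n < (5:Int)) from by omega, show (9:Int) ≤ n from by omega, show ¬(n < (9:Int)) from by omega, show (13:Int) ≤ n from by omega, show ¬(n < (13:Int)) from by omega, show (21:Int) ≤ n from by omega, show ¬(n < (21:Int)) from by omega, show (25:Int) ≤ n from by omega, show ¬(n < (25:Int)) from by omega, show ¬((29:Int) ≤ n) from by omega, show n < (29:Int) from by omega, show ¬((33:Int) ≤ n) from by omega, show ¬((41:Int) ≤ n) from by omega, show ¬((45:Int) ≤ n) from by omega]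
  by_cases h7 : 29 ≤ n ∧ n < 33
  · simp [loopA, List.filter, show (1:Int) ≤ n from by omega, show (5:Int) ≤ n from by omega, show ¬(n < (5:Int)) from by omega, show (9:Int) ≤ n from by omega, show ¬(n < (9:Int)) from by omega, show (13:Int) ≤ n from by omega, show ¬(n < (13:Int)) from by omega, show (21:Int) ≤ n from by omega, show ¬(n < (21:Int)) from by omega, show (25:Int) ≤ n from by omega, show ¬(n < (25:Int)) from by omega, show (29:Int) ≤ n from by omega, show ¬(n < (29:Int)) from by omega, show ¬((33:Int) ≤ n) from by omega, show n < (33:Int) from by omega, show ¬((41:Int) ≤ n) from by omega, show ¬((45:Int) ≤ n) from by omega]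
  by_cases h8 : 33 ≤ n ∧ n < 41
  · simp [loopA, List.filter, show (1:Int) ≤ n from by omega, show (5:Int) ≤ n from by omega, show ¬(n < (5:Int)) from by omega, show (9:Int) ≤ n from by omega, show ¬(n < (9:Int)) from by omega, show (13:Int) ≤ n from by omega, show ¬(n < (13:Int)) from by omega, show (21:Int) ≤ n from by omega, show ¬(n < (21:Int)) from by omega, show (25:Int) ≤ n from by omega, show ¬(n < (25:Int)) from by omega, show (29:Int) ≤ n from by omega, show ¬(n < (29:Int)) from by omega, show (33:Int) ≤ n from by omega, show ¬(n < (33:Int)) from by omega, show ¬((41:Int) ≤ n) from by omega, show n < (41:Int) from by omega, show ¬((45:Int) ≤ n) from by omega]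
  by_cases h9 : 41 ≤ n ∧ n < 45
  · simp [loopA, List.filter, show (1:Int) ≤ n from by omega, show (5:Int) ≤ n from by omega, show ¬(n < (5:Int)) from by omega, show (9:Int) ≤ n from by omega, show ¬(n < (9:Int)) from by omega, show (13:Int) ≤ n from by omega, show ¬(n < (13:Int)) from by omega, show (21:Int) ≤ n from by omega, show ¬(n < (21:Int)) from by omega, show (25:Int) ≤ n from by omega, show ¬(n < (25:Int)) from by omega, show (29:Int) ≤ n from by omega, show ¬(n < (29:Int)) from by omega, show (33:Int) ≤ n from by omega, show ¬(n < (33:Int)) from by omega, show (41:Int) ≤ n from by omega, show ¬(n < (41:Int)) from by omega, show ¬((45:Int) ≤ n) from by omega, show n < (45:Int) from by omega]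
  by_cases h10 : 45 ≤ n
  · simp [loopA, List.filter, show (1:Int) ≤ n from by omega, show (5:Int) ≤ n from by omega, show ¬(n < (5:Int)) from by omega, show (9:Int) ≤ n from by omega, show ¬(n < (9:Int)) from by omega, show (13:Int) ≤ n from by omega, show ¬(n < (13:Int)) from by omega, show (21:Int) ≤ n from by omega, show ¬(n < (21:Int)) from by omega, show (25:Int) ≤ n from by omega, show ¬(n < (25:Int)) from by omega, show (29:Int) ≤ n from by omega, show ¬(n < (29:Int)) from by omega, show (33:Int) ≤ n from by omega, show ¬(n < (33:Int)) from by omega, show (41:Int) ≤ n from by omega, show ¬(n < (41:Int)) from by omega, show (45:Int) ≤ n from by omega, show ¬(n < (45:Int)) from by omega]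
  · omega

theorem generate_series_spec : Claim_equal_generate_series := by
  intro n _
  exact generate_series_key n
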